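-- pv_equiv track=rewrite | github.com/delroy2826/Programs_MasterBranch | Set_interview_question.py | fuction1
-- ===== SOURCE A (Python) =====
-- def fuction1(l):
--     count=0
--     for i in l:
--         if i%3==0:
--             count+=i*2
--         elif i%7==0:
--             count+=i*3
--         elif i%21==0:
--             count+=i*7
--     return count
-- ===== SOURCE B (Python) =====
-- def fuction1(l):
--     s3 = sum(i for i in l if i % 3 == 0)
--     s7 = sum(i for i in l if i % 3 != 0 and i % 7 == 0)
--     return 2 * s3 + 3 * s7
-- ===== Notes on version B (the rewrite author's own statement) =====
-- stated objective: simpler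
-- what changed: Replaces the single priority-branching accumulator loop with two independent filtered sums (2*sum of multiples of 3 plus 3*sum of multiples of 7 not divisible by 3), dropping A's dead %21 branch which can never fire.
import Mathlib
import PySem

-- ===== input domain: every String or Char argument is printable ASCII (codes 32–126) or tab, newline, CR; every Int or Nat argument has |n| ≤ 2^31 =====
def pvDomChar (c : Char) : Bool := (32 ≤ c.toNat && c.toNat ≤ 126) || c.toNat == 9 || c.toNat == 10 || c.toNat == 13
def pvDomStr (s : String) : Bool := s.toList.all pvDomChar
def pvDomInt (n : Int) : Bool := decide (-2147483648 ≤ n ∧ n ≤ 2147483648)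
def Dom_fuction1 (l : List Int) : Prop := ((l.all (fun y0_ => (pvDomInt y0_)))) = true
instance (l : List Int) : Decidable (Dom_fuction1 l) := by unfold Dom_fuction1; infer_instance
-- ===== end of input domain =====

-- ===== PORT A =====
-- Literal port of A: fold over the list with the same branch order.
def fuction1 (l : List Int) : Int :=
  l.foldl (fun count i =>
    if PySem.Int.mod i 3 = 0 then count + i * 2
    else if PySem.Int.mod i 7 = 0 then count + i * 3
    else if PySem.Int.mod i 21 = 0 then count + i * 7
    else count) 0

-- ===== PORT B =====
-- B: two independent filtered sums; A's %21 branch is dead and dropped.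
def fuction1_alt (l : List Int) : Int :=
  2 * ((l.filter (fun i => PySem.Int.mod i 3 = 0)).sum)
  + 3 * ((l.filter (fun i => PySem.Int.mod i 3 ≠ 0 ∧ PySem.Int.mod i 7 = 0)).sum)

-- ===== PRECONDITION & SPEC =====
def Spec_fuction1 (l : List Int) (out : Int) : Prop := out = fuction1_alt l
instance (l : List Int) (out : Int) : Decidable (Spec_fuction1 l out) := by unfold Spec_fuction1; infer_instance

-- ===== CLAIM (what is proved, stated in full; the proofs are below) =====
def Claim_equal_fuction1 : Prop := ∀ (l : List Int), Dom_fuction1 l → Spec_fuction1 l (fuction1 l)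

-- ===== LEMMAS AND PROOFS =====

-- ===== VERDICT (by name: the statement is the Claim_ definition above) =====
theorem fuction1_foldl_shift (l : List Int) (c : Int) :
    l.foldl (fun count i =>
      if PySem.Int.mod i 3 = 0 then count + i * 2
      else if PySem.Int.mod i 7 = 0 then count + i * 3
      else if PySem.Int.mod i 21 = 0 then count + i * 7
      else count) c
    = c + l.foldl (fun count i =>
      if PySem.Int.mod i 3 = 0 then count + i * 2
      else if PySem.Int.mod i 7 = 0 then count + i * 3
      else if PySem.Int.mod i 21 = 0 then count + i * 7
      else count) 0 := by
  induction l generalizing c with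
  | nil => simp
  | cons x xs ih =>
    rw [List.foldl_cons, List.foldl_cons, ih]
    conv_rhs => rw [ih]
    split_ifs <;> ring

theorem fuction1_eq_alt (l : List Int) : fuction1 l = fuction1_alt l := by
  unfold fuction1 fuction1_alt
  induction l with
  | nil => simp
  | cons x xs ih =>
    rw [List.foldl_cons, fuction1_foldl_shift, ih]
    simp only [List.filter_cons, PySem.Int.mod_eq_zero_iff_dvd]
    by_cases h3 : (3:Int) ∣ x <;> by_cases h7 : (7:Int) ∣ x <;>
      simp [h3, h7]
    · ring
    · ring
    · ring
    · intro h21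
      exact absurd (dvd_trans ⟨7, by norm_num⟩ h21) h3

theorem fuction1_spec : Claim_equal_fuction1 :=
  fun l _ => fuction1_eq_alt l
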